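-- pv_equiv track=rewrite | github.com/samuel871211/My-python-code | CodeSignal Core/lateRide.py | lateRide
-- ===== SOURCE A (Python) =====
-- def lateRide(n):
--     hour = str(n//60)
--     minute = str(n-(60*(n//60)))
--     final = 0
--     for i in range(len(hour)):
--         final += int(hour[i])
--     for i in range(len(minute)):
--         final += int(minute[i])
--     return final
-- ===== SOURCE B (Python) =====
-- def lateRide(n):
--     hour, minute = divmod(n, 60)
--     total = 0
--     for x in (hour, minute):
--         while x > 0:
--             total += x % 10
--             x //= 10
--     return total
-- ===== Notes on version B (the rewrite author's own statement) =====
-- stated objective: idiomatic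
-- what changed: Replaces string conversion plus per-character int() parsing with divmod(n, 60) and arithmetic digit extraction (repeated % 10 and // 10), never building strings.
import Mathlib
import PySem

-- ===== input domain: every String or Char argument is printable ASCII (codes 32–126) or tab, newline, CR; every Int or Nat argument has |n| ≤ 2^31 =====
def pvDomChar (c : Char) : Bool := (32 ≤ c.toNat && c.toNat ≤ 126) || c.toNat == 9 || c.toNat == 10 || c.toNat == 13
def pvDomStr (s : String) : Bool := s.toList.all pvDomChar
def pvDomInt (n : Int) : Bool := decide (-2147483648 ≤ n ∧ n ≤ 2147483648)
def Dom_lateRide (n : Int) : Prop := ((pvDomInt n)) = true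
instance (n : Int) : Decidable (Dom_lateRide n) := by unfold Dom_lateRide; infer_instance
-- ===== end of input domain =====

-- B replaces string conversion and per-character int() parsing with divmod and
-- arithmetic digit extraction (% 10 and // 10); objective: more idiomatic.

-- ===== PORT A =====
-- int(hour[i]) / int(minute[i]): Python int() applied to a one-character string (exact via PySem.Int.ofChars?);
-- under Pre_ every character is a digit, so the getD default is never used.
def pvDigitOf (c : Char) : Int := (PySem.Int.ofChars? [c]).getD 0

def lateRide (n : Int) : Int :=
  let hour := PySem.Int.toChars (PySem.Int.floordiv n 60)
  let minute := PySem.Int.toChars (n - 60 * PySem.Int.floordiv n 60)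
  let final : Int := 0
  let final := (List.range hour.length).foldl (fun acc i => acc + pvDigitOf (hour.getD i ' ')) final
  let final := (List.range minute.length).foldl (fun acc i => acc + pvDigitOf (minute.getD i ' ')) final
  final

-- ===== PORT B =====
-- the 'while x > 0: total += x % 10; x //= 10' loop of Source B
def pvDigSum (x : Int) : Int :=
  if _h : 0 < x then PySem.Int.mod x 10 + pvDigSum (PySem.Int.floordiv x 10) else 0
termination_by x.toNat
decreasing_by
  have h10 : PySem.Int.floordiv x 10 = x / 10 := by
    simp [PySem.Int.floordiv, Int.fdiv_eq_ediv]
  rw [h10]; omega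

def lateRide_alt (n : Int) : Int :=
  let hm := (PySem.Int.divmod? n 60).getD (0, 0)
  pvDigSum hm.1 + pvDigSum hm.2

-- ===== PRECONDITION & SPEC =====
-- Pre_ excludes exactly n < 0, on which A raises ValueError (int('-') on the sign character of str(n//60)).
def Pre_lateRide (n : Int) : Prop := 0 ≤ n
instance (n : Int) : Decidable (Pre_lateRide n) := by unfold Pre_lateRide; infer_instance
def pvWitness_lateRide : Int := 125

def Spec_lateRide (n : Int) (out : Int) : Prop := out = lateRide_alt n
instance (n : Int) (out : Int) : Decidable (Spec_lateRide n out) := by unfold Spec_lateRide; infer_instance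

-- ===== CLAIM (what is proved, stated in full; the proofs are below) =====
def Claim_equal_lateRide : Prop := ∀ (n : Int), Dom_lateRide n → Pre_lateRide n → Spec_lateRide n (lateRide n)

-- ===== LEMMAS AND PROOFS =====

-- arithmetic digit sum on Nat, the nonnegative mirror of pvDigSum
def pvDigSumN (m : Nat) : Nat :=
  if m = 0 then 0 else m % 10 + pvDigSumN (m / 10)

theorem pvDigSum_natCast (m : Nat) : pvDigSum (m : Int) = (pvDigSumN m : Int) := by
  induction m using Nat.strong_induction_on with
  | _ m ih =>
    rw [pvDigSum, pvDigSumN]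
    by_cases h : m = 0
    · simp [h]
    · have hpos : (0:Int) < (m:Int) := by exact_mod_cast Nat.pos_of_ne_zero h
      rw [dif_pos hpos, if_neg h]
      have hdiv : PySem.Int.floordiv (m : Int) 10 = ((m / 10 : Nat) : Int) := by
        simp [PySem.Int.floordiv, Int.fdiv_eq_ediv]
      have hmod : PySem.Int.mod (m : Int) 10 = ((m % 10 : Nat) : Int) := by
        simp [PySem.Int.mod, Int.fmod_eq_emod]
      rw [hdiv, hmod, ih (m / 10) (Nat.div_lt_self (Nat.pos_of_ne_zero h) (by norm_num))]
      push_cast; ring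

theorem digitOf_digitChar (d : Nat) (hd : d < 10) : pvDigitOf (Nat.digitChar d) = (d : Int) := by
  interval_cases d <;> decide

theorem foldl_range_getD (l : List Char) (a : Int) :
    (List.range l.length).foldl (fun acc i => acc + pvDigitOf (l.getD i ' ')) a
    = a + (l.map pvDigitOf).sum := by
  induction l generalizing a with
  | nil => simp
  | cons c l ih =>
    rw [List.length_cons, List.range_succ_eq_map, List.foldl_cons, List.foldl_map]
    simpa [add_assoc] using ih (a + pvDigitOf c)

theorem toDigitsCore_sum (f : Nat) : ∀ (m : Nat) (acc : List Char), m < f →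
    ((Nat.toDigitsCore 10 f m acc).map pvDigitOf).sum
    = (pvDigSumN m : Int) + (acc.map pvDigitOf).sum := by
  induction f with
  | zero => intro m _ h; omega
  | succ f ih =>
    intro m acc hm
    rw [Nat.toDigitsCore]
    by_cases h0 : m / 10 = 0
    · rw [if_pos h0]
      by_cases hz : m = 0
      · subst hz
        conv_rhs => rw [pvDigSumN]
        simp [digitOf_digitChar 0 (by norm_num)]
      · conv_rhs => rw [pvDigSumN, if_neg hz, h0, pvDigSumN]
        simp [digitOf_digitChar (m % 10) (Nat.mod_lt _ (by norm_num))]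
    · rw [if_neg h0]
      have hm10 : m / 10 < f := by
        have : m / 10 < m := Nat.div_lt_self (by omega) (by norm_num)
        omega
      rw [ih (m / 10) _ hm10]
      have hz : m ≠ 0 := by
        intro hc; subst hc; simp at h0
      conv_rhs => rw [pvDigSumN, if_neg hz]
      simp [digitOf_digitChar (m % 10) (Nat.mod_lt _ (by norm_num))]
      ring

theorem toChars_sum (m : Nat) :
    ((PySem.Int.toChars (m : Int)).map pvDigitOf).sum = (pvDigSumN m : Int) := by
  have : PySem.Int.toChars (m : Int) = Nat.toDigits 10 m := by
    simp [PySem.Int.toChars]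
  rw [this, Nat.toDigits]
  simpa using toDigitsCore_sum (m + 1) m [] (Nat.lt_succ_self m)

theorem fdiv_nonneg' (n : Int) (h : 0 ≤ n) : PySem.Int.floordiv n 60 = ((n / 60).toNat : Int) := by
  simp [PySem.Int.floordiv, Int.fdiv_eq_ediv]
  omega

-- ===== VERDICT (by name: the statement is the Claim_ definition above) =====
theorem lateRide_spec : Claim_equal_lateRide := by
  intro n _ hn
  unfold Spec_lateRide lateRide lateRide_alt
  simp only [PySem.Int.divmod?, if_neg (by norm_num : (60:Int) ≠ 0), Option.getD_some]
  have hdiv : PySem.Int.floordiv n 60 = ((n / 60).toNat : Int) := fdiv_nonneg' n hn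
  have hfd : Int.fdiv n 60 = ((n / 60).toNat : Int) := hdiv
  unfold Pre_lateRide at hn
  have hfm : Int.fmod n 60 = (((n % 60).toNat : Nat) : Int) := by
    simp [Int.fmod_eq_emod]
    omega
  have hminute : n - 60 * PySem.Int.floordiv n 60 = (((n % 60).toNat : Nat) : Int) := by
    rw [hdiv]; omega
  rw [hminute, hdiv, hfd, hfm,
    foldl_range_getD, foldl_range_getD, toChars_sum, toChars_sum,
    pvDigSum_natCast, pvDigSum_natCast]
  ring
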